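-- pv_equiv track=rewrite | github.com/Saathy-AI/saathy | src/saathy/chunking/strategies/git_commit.py | _split_commit_parts
-- ===== SOURCE A (Python) =====
-- def _split_commit_parts(content: str) -> tuple[str, str]:
--     """Split commit content into message and diff parts."""
--     lines = content.split("\n")
--     message_lines = []
--     diff_lines = []
--     in_diff = False
--
--     for line in lines:
--         if line.startswith("diff --git"):
--             in_diff = True
--
--         if in_diff:
--             diff_lines.append(line)
--         else:
--             message_lines.append(line)
--
--     return "\n".join(message_lines), "\n".join(diff_lines)
-- ===== SOURCE B (Python) =====
-- def _split_commit_parts(content: str) -> tuple[str, str]: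
--     """Split commit content into message and diff parts."""
--     if content.startswith("diff --git"):
--         return "", content
--     idx = content.find("\ndiff --git")
--     if idx == -1:
--         return content, ""
--     return content[:idx], content[idx + 1:]
-- ===== Notes on version B (the rewrite author's own statement) =====
-- stated objective: simpler
-- what changed: Replaces the split-into-lines loop with a stateful flag and two accumulator lists plus two joins by a direct computation of the split point on the raw string: a startswith check for a marker on the first line, one find of ' diff --git', and two slices.
import Mathlib
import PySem

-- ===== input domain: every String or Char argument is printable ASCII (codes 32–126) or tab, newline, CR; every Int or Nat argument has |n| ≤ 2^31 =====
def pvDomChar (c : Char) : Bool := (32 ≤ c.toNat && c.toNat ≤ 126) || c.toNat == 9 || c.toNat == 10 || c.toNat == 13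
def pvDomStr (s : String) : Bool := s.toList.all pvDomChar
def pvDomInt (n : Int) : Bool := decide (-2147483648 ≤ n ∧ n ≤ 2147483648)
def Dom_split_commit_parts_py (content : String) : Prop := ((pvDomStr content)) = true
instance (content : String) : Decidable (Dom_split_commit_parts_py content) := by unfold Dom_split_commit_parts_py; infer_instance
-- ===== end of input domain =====

-- B replaces A's line loop with a flag and two accumulator lists by a direct computation
-- of the split point on the raw string (startswith + one find + two slices); objective: simpler.

-- ===== PORT A =====
-- the marker literal "diff --git"
def pvMarker : List Char := "diff --git".toList

-- one iteration of A's for-loop: state = (message_lines, diff_lines, in_diff)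
def pvSplitStep (st : List (List Char) × List (List Char) × Bool) (line : List Char) :
    List (List Char) × List (List Char) × Bool :=
  let in_diff := if PySem.Chars.startswith line pvMarker then true else st.2.2
  if in_diff then (st.1, st.2.1 ++ [line], in_diff)
  else (st.1 ++ [line], st.2.1, in_diff)

def split_commit_parts_py (content : String) : String × String :=
  -- content.split("\n"): the separator is the non-empty literal "\n", so Python never raises
  let lines := PySem.Chars.splitOn content.toList "\n".toList
  let r := lines.foldl pvSplitStep ([], [], false)
  (String.ofList (PySem.Chars.join "\n".toList r.1),
   String.ofList (PySem.Chars.join "\n".toList r.2.1))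

-- ===== PORT B =====
def split_commit_parts_py_alt (content : String) : String × String :=
  if PySem.Str.startswith content "diff --git" then ("", content)
  else
    let idx := PySem.Str.find content "\ndiff --git"
    if idx = -1 then (content, "")
    else (PySem.Str.slice content none (some idx),
          PySem.Str.slice content (some (idx + 1)) none)

-- ===== PRECONDITION & SPEC =====
def Spec_split_commit_parts_py (content : String) (out : String × String) : Prop := out = split_commit_parts_py_alt content
instance (content : String) (out : String × String) : Decidable (Spec_split_commit_parts_py content out) := by unfold Spec_split_commit_parts_py; infer_instance

-- ===== CLAIM (what is proved, stated in full; the proofs are below) =====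
def Claim_equal_split_commit_parts_py : Prop := ∀ (content : String), Dom_split_commit_parts_py content → Spec_split_commit_parts_py content (split_commit_parts_py content)

-- ===== LEMMAS AND PROOFS =====

-- the loop's line test, as a takeWhile/dropWhile predicate ("not yet in the diff part")
def pvQ (l : List Char) : Bool := !PySem.Chars.startswith l pvMarker

theorem pv_go_single (c : Char) : ∀ (fuel : Nat) (l cur : List Char) (acc : List (List Char)),
    l.length < fuel →
    PySem.Chars.splitOn.go [c] fuel l cur acc
      = acc.reverse ++ (List.splitOnP (· == c) l).modifyHead (cur.reverse ++ ·) := by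
  intro fuel
  induction fuel with
  | zero => intro l cur acc h; exact absurd h (Nat.not_lt_zero _)
  | succ fuel ih =>
    intro l cur acc h
    cases l with
    | nil => simp [PySem.Chars.splitOn.go, List.splitOnP_nil]
    | cons x rest =>
      rw [PySem.Chars.splitOn.go]
      simp only [List.length_cons] at h
      by_cases hx : x = c
      · subst hx
        have hpre : ([x].isPrefixOf (x :: rest)) = true := by simp [List.isPrefixOf]
        rw [hpre]
        simp only [if_true]
        have hd : List.drop [x].length (x :: rest) = rest := rfl
        rw [hd, ih rest [] (cur.reverse :: acc) (by omega)]
        obtain ⟨a, as, hsp⟩ := List.exists_cons_of_ne_nil (List.splitOnP_ne_nil (· == x) rest)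
        simp [List.splitOnP_cons, hsp]
      · have hpre : ([c].isPrefixOf (x :: rest)) = false := by
          simp [List.isPrefixOf]
          exact fun hc => absurd hc.symm hx
        rw [hpre]
        simp only [Bool.false_eq_true, if_false]
        rw [ih rest (x :: cur) acc (by omega)]
        obtain ⟨a, as, hsp⟩ := List.exists_cons_of_ne_nil (List.splitOnP_ne_nil (· == c) rest)
        simp [List.splitOnP_cons, hsp, hx]

theorem pv_splitOn_eq (s : List Char) (c : Char) :
    PySem.Chars.splitOn s [c] = List.splitOnP (· == c) s := by
  rw [PySem.Chars.splitOn, pv_go_single c (s.length + 1) s [] [] (by omega)]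
  obtain ⟨a, as, hsp⟩ := List.exists_cons_of_ne_nil (List.splitOnP_ne_nil (· == c) s)
  simp [hsp]

theorem pv_splitOnP_pieces (p : Char → Bool) :
    ∀ (s piece : List Char), piece ∈ List.splitOnP p s → ∀ x ∈ piece, p x = false := by
  intro s
  induction s with
  | nil => intro piece hp x hx; simp [List.splitOnP_nil] at hp; subst hp; simp at hx
  | cons a s' ih =>
    intro piece hp x hx
    rw [List.splitOnP_cons] at hp
    by_cases ha : p a = true
    · rw [if_pos ha] at hp
      rcases List.mem_cons.mp hp with h | h
      · subst h; simp at hx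
      · exact ih piece h x hx
    · rw [if_neg ha] at hp
      obtain ⟨b, bs, hsp⟩ := List.exists_cons_of_ne_nil (List.splitOnP_ne_nil p s')
      rw [hsp] at hp
      simp only [List.modifyHead] at hp
      rcases List.mem_cons.mp hp with h | h
      · subst h
        rcases List.mem_cons.mp hx with rfl | hxb
        · simpa using ha
        · exact ih b (by rw [hsp]; exact List.mem_cons_self) x hxb
      · exact ih piece (by rw [hsp]; exact List.mem_cons_of_mem _ h) x hx

theorem pv_join_cons (c : Char) (h : List Char) (t : List (List Char)) (ht : t ≠ []) :
    PySem.Chars.join [c] (h :: t) = h ++ c :: PySem.Chars.join [c] t := by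
  obtain ⟨q, rest, rfl⟩ := List.exists_cons_of_ne_nil ht
  rw [PySem.Chars.join_cons_cons]
  simp

theorem pv_join_append (c : Char) : ∀ (A B : List (List Char)), A ≠ [] → B ≠ [] →
    PySem.Chars.join [c] (A ++ B) = PySem.Chars.join [c] A ++ c :: PySem.Chars.join [c] B := by
  intro A
  induction A with
  | nil => intro B hA; exact absurd rfl hA
  | cons a A' ih =>
    intro B hA hB
    cases A' with
    | nil =>
      rw [List.singleton_append, pv_join_cons c a B hB, PySem.Chars.join_singleton]
    | cons a2 A'' =>
      rw [List.cons_append, pv_join_cons c a ((a2 :: A'') ++ B) (by simp),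
          pv_join_cons c a (a2 :: A'') (by simp), ih B (by simp) hB]
      simp

theorem pv_prefix_cut (c : Char) : ∀ (a mk r : List Char), c ∉ mk → c ∉ a →
    mk <+: a ++ c :: r → mk <+: a := by
  intro a
  induction a with
  | nil =>
    intro mk r hmk _ hp
    cases mk with
    | nil => exact List.nil_prefix
    | cons m0 mk' =>
      rw [List.nil_append, List.cons_prefix_cons] at hp
      exact absurd (hp.1 ▸ List.mem_cons_self) hmk
  | cons y a' ih =>
    intro mk r hmk ha hp
    cases mk with
    | nil => exact List.nil_prefix
    | cons m0 mk' =>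
      rw [List.cons_append, List.cons_prefix_cons] at hp
      rw [List.cons_prefix_cons]
      refine ⟨hp.1, ih mk' r (fun hx => hmk (List.mem_cons_of_mem _ hx))
        (fun hx => ha (List.mem_cons_of_mem _ hx)) hp.2⟩

theorem pv_find_eq_of (s sub : List Char) (k : Nat)
    (h1 : sub <+: s.drop k) (h2 : ∀ i < k, ¬ sub <+: s.drop i) :
    PySem.Chars.find s sub = (k : Int) := by
  have hin : sub <:+: s := h1.isInfix.trans (List.drop_suffix k s).isInfix
  have hnn : 0 ≤ PySem.Chars.find s sub := (PySem.Chars.find_nonneg_iff s sub).mpr hin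
  obtain ⟨hp, hmin⟩ := PySem.Chars.find_spec hnn
  have hk : (PySem.Chars.find s sub).toNat = k := by
    rcases Nat.lt_trichotomy (PySem.Chars.find s sub).toNat k with h | h | h
    · exact absurd hp (h2 _ h)
    · exact h
    · exact absurd h1 (hmin k h)
  omega

theorem pv_no_occ_inside (c : Char) (h r mk : List Char) (hh : c ∉ h) :
    ∀ i < h.length, ¬ (c :: mk) <+: (h ++ r).drop i := by
  intro i hi hp
  rw [List.drop_append] at hp
  obtain ⟨y, ys, hd⟩ := List.exists_cons_of_ne_nil (by
    intro hnil
    have : h.length - i = 0 := by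
      have := congrArg List.length hnil
      simp at this; omega
    omega : h.drop i ≠ [])
  rw [hd, List.cons_append, List.cons_prefix_cons] at hp
  have : y ∈ h := List.mem_of_mem_drop (hd ▸ List.mem_cons_self)
  exact hh (hp.1 ▸ this)

theorem pv_find_join (t : List (List Char)) : ∀ (h : List Char),
    (∀ l ∈ h :: t, ('\n' : Char) ∉ l) → PySem.Chars.startswith h pvMarker = false →
    PySem.Chars.find (PySem.Chars.join ['\n'] (h :: t)) ('\n' :: pvMarker)
      = if (h :: t).dropWhile pvQ = [] then -1
        else ((PySem.Chars.join ['\n'] ((h :: t).takeWhile pvQ)).length : Int) := by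
  have hcmk : ('\n' : Char) ∉ pvMarker := by decide
  induction t with
  | nil =>
    intro h hnl hP
    have hqh : pvQ h = true := by simp [pvQ, hP]
    rw [List.dropWhile_cons_of_pos hqh, List.dropWhile_nil, if_pos rfl,
        PySem.Chars.join_singleton, PySem.Chars.find_eq_neg_one_iff]
    intro hin
    exact hnl h List.mem_cons_self (hin.subset List.mem_cons_self)
  | cons l2 t' ih =>
    intro h hnl hP
    have hqh : pvQ h = true := by simp [pvQ, hP]
    have hnlh : ('\n' : Char) ∉ h := hnl h List.mem_cons_self
    have hnl2 : ('\n' : Char) ∉ l2 := hnl l2 (List.mem_cons_of_mem _ List.mem_cons_self)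
    have hs : PySem.Chars.join ['\n'] (h :: l2 :: t')
        = h ++ '\n' :: PySem.Chars.join ['\n'] (l2 :: t') := pv_join_cons _ _ _ (by simp)
    set u := PySem.Chars.join ['\n'] (l2 :: t') with hu
    have hul2 : l2 <+: u := by
      cases t' with
      | nil => rw [hu, PySem.Chars.join_singleton]
      | cons a b => rw [hu, pv_join_cons _ _ _ (by simp)]; exact List.prefix_append _ _
    have hcutu : pvMarker <+: u → pvMarker <+: l2 := by
      cases t' with
      | nil => rw [hu, PySem.Chars.join_singleton]; exact id
      | cons a b =>
        rw [hu, pv_join_cons _ _ _ (by simp)]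
        exact pv_prefix_cut '\n' l2 pvMarker _ hcmk hnl2
    rw [hs, List.dropWhile_cons_of_pos hqh, List.takeWhile_cons_of_pos hqh]
    by_cases hP2 : PySem.Chars.startswith l2 pvMarker = true
    · have hq2 : pvQ l2 = false := by simp [pvQ, hP2]
      rw [List.dropWhile_cons_of_neg (by simp [hq2]), if_neg (by simp),
          List.takeWhile_cons_of_neg (by simp [hq2]), PySem.Chars.join_singleton]
      apply pv_find_eq_of
      · rw [List.drop_left]
        rw [List.cons_prefix_cons]
        exact ⟨rfl, ((PySem.Chars.startswith_iff _ _).mp hP2).trans hul2⟩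
      · exact pv_no_occ_inside '\n' h _ pvMarker hnlh
    · have hq2 : pvQ l2 = true := by simp [pvQ]; simpa using hP2
      have hP2' : PySem.Chars.startswith l2 pvMarker = false := by simpa using hP2
      have IH := ih l2 (fun l hl => hnl l (List.mem_cons_of_mem _ hl)) hP2'
      rw [← hu] at IH
      by_cases hD : (l2 :: t').dropWhile pvQ = []
      · rw [if_pos hD]
        rw [if_pos hD] at IH
        rw [PySem.Chars.find_eq_neg_one_iff]
        intro hin
        obtain ⟨j, hj⟩ := (PySem.Chars.exists_prefix_drop_iff_isIn _ _).mpr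
          ((PySem.Chars.isIn_iff_infix _ _).mpr hin)
        rcases Nat.lt_trichotomy j h.length with hlt | heq | hgt
        · exact pv_no_occ_inside '\n' h _ pvMarker hnlh j hlt hj
        · rw [heq, List.drop_left, List.cons_prefix_cons] at hj
          exact hP2 ((PySem.Chars.startswith_iff _ _).mpr (hcutu hj.2))
        · obtain ⟨m, hm⟩ : ∃ m, j - h.length = m + 1 := ⟨j - h.length - 1, by omega⟩
          rw [List.drop_append, List.drop_eq_nil_of_le (by omega), hm,
              List.drop_succ_cons, List.nil_append] at hj
          have : ('\n' :: pvMarker) <:+: u := hj.isInfix.trans (List.drop_suffix m u).isInfix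
          exact (PySem.Chars.find_eq_neg_one_iff _ _).mp IH this
      · rw [if_neg hD]
        rw [if_neg hD] at IH
        have hT' : (l2 :: t').takeWhile pvQ ≠ [] := by
          rw [List.takeWhile_cons_of_pos hq2]; simp
        have hjT : PySem.Chars.join ['\n'] (h :: (l2 :: t').takeWhile pvQ)
            = h ++ '\n' :: PySem.Chars.join ['\n'] ((l2 :: t').takeWhile pvQ) :=
          pv_join_cons _ _ _ hT'
        set k' := (PySem.Chars.join ['\n'] ((l2 :: t').takeWhile pvQ)).length with hk'
        have hnnu : 0 ≤ PySem.Chars.find u ('\n' :: pvMarker) := by rw [IH]; positivity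
        obtain ⟨hpu, hminu⟩ := PySem.Chars.find_spec hnnu
        have htn : (PySem.Chars.find u ('\n' :: pvMarker)).toNat = k' := by rw [IH]; simp
        rw [htn] at hpu hminu
        have hlen : (PySem.Chars.join ['\n'] (h :: (l2 :: t').takeWhile pvQ)).length
            = h.length + 1 + k' := by rw [hjT]; simp; omega
        rw [hlen]
        apply pv_find_eq_of
        · rw [List.drop_append, List.drop_eq_nil_of_le (by omega), List.nil_append]
          have : h.length + 1 + k' - h.length = k' + 1 := by omega
          rw [this, List.drop_succ_cons]
          exact hpu
        · intro i hi hj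
          rcases Nat.lt_trichotomy i h.length with hlt | heq | hgt
          · exact pv_no_occ_inside '\n' h _ pvMarker hnlh i hlt hj
          · rw [heq, List.drop_left, List.cons_prefix_cons] at hj
            exact hP2 ((PySem.Chars.startswith_iff _ _).mpr (hcutu hj.2))
          · obtain ⟨m, hm⟩ : ∃ m, i - h.length = m + 1 := ⟨i - h.length - 1, by omega⟩
            rw [List.drop_append, List.drop_eq_nil_of_le (by omega), hm,
                List.drop_succ_cons, List.nil_append] at hj
            exact hminu m (by omega) hj

-- A's loop once the flag is true: every remaining line goes to diff_lines
theorem pv_foldl_true (lines : List (List Char)) : ∀ (ms ds : List (List Char)),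
    lines.foldl pvSplitStep (ms, ds, true) = (ms, ds ++ lines, true) := by
  induction lines with
  | nil => intro ms ds; simp
  | cons l rest ih =>
    intro ms ds
    have hstep : pvSplitStep (ms, ds, true) l = (ms, ds ++ [l], true) := by
      cases hc : PySem.Chars.startswith l pvMarker <;> simp [pvSplitStep, hc]
    rw [List.foldl_cons, hstep, ih]
    simp

-- A's loop from a false flag: message = takeWhile pvQ, diff = dropWhile pvQ
theorem pv_foldl_false (lines : List (List Char)) : ∀ (ms ds : List (List Char)),
    lines.foldl pvSplitStep (ms, ds, false)
      = (ms ++ lines.takeWhile pvQ, ds ++ lines.dropWhile pvQ, !(lines.dropWhile pvQ).isEmpty) := by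
  induction lines with
  | nil => intro ms ds; simp
  | cons l rest ih =>
    intro ms ds
    by_cases hP : PySem.Chars.startswith l pvMarker = true
    · have hq : pvQ l = false := by simp [pvQ, hP]
      have hstep : pvSplitStep (ms, ds, false) l = (ms, ds ++ [l], true) := by
        simp [pvSplitStep, hP]
      rw [List.foldl_cons, hstep, pv_foldl_true,
          List.takeWhile_cons_of_neg (by simp [hq]), List.dropWhile_cons_of_neg (by simp [hq])]
      simp
    · have hP' : PySem.Chars.startswith l pvMarker = false := by simpa using hP
      have hq : pvQ l = true := by simp [pvQ, hP']
      have hstep : pvSplitStep (ms, ds, false) l = (ms ++ [l], ds, false) := by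
        simp [pvSplitStep, hP']
      rw [List.foldl_cons, hstep, ih,
          List.takeWhile_cons_of_pos hq, List.dropWhile_cons_of_pos hq]
      simp

-- the two ports agree on every string
theorem pv_main (content : String) :
    split_commit_parts_py content = split_commit_parts_py_alt content := by
  have hnlchar : "\n".toList = ['\n'] := by decide
  have hnlmk : "\ndiff --git".toList = '\n' :: pvMarker := by decide
  have hcmk : ('\n' : Char) ∉ pvMarker := by decide
  set s := content.toList with hs
  obtain ⟨h, t, hLht⟩ := List.exists_cons_of_ne_nil
    (List.splitOnP_ne_nil (fun x => x == '\n') s)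
  have hpieces : ∀ l ∈ h :: t, ('\n' : Char) ∉ l := by
    intro l hl hmem
    have := pv_splitOnP_pieces (fun x => x == '\n') s l (hLht ▸ hl) '\n' hmem
    simp at this
  have hjoin : PySem.Chars.join ['\n'] (h :: t) = s := by
    rw [← hLht]
    exact List.intercalate_splitOn s '\n'
  have hsplitOn : PySem.Chars.splitOn s "\n".toList = h :: t := by
    rw [hnlchar, pv_splitOn_eq, hLht]
  have hprefh : h <+: s := by
    rw [← hjoin]
    cases t with
    | nil => rw [PySem.Chars.join_singleton]
    | cons a b => rw [pv_join_cons _ _ _ (by simp)]; exact List.prefix_append _ _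
  have hcuth : pvMarker <+: s → pvMarker <+: h := by
    intro hp
    rw [← hjoin] at hp
    cases t with
    | nil => rwa [PySem.Chars.join_singleton] at hp
    | cons a b =>
      rw [pv_join_cons _ _ _ (by simp)] at hp
      exact pv_prefix_cut '\n' h pvMarker _ hcmk (hpieces h List.mem_cons_self) hp
  simp only [split_commit_parts_py, split_commit_parts_py_alt]
  rw [← hs, hsplitOn, pv_foldl_false, hnlchar]
  by_cases hstart : PySem.Str.startswith content "diff --git" = true
  · -- the very first line starts with the marker
    rw [if_pos hstart]
    have hmkh : pvMarker <+: h := by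
      apply hcuth
      have : PySem.Chars.startswith s pvMarker = true := by
        simpa [PySem.Str.startswith, ← hs] using hstart
      exact (PySem.Chars.startswith_iff _ _).mp this
    have hq : pvQ h = false := by
      simp [pvQ]
      exact (PySem.Chars.startswith_iff _ _).mpr hmkh
    rw [List.takeWhile_cons_of_neg (by simp [hq]), List.dropWhile_cons_of_neg (by simp [hq])]
    simp only [List.nil_append, PySem.Chars.join_nil, hjoin]
    rw [hs, String.ofList_toList]
  · -- no marker on the first line
    rw [if_neg hstart]
    have hP : PySem.Chars.startswith h pvMarker = false := by
      rw [Bool.eq_false_iff]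
      intro hc
      apply hstart
      have : pvMarker <+: s := ((PySem.Chars.startswith_iff _ _).mp hc).trans hprefh
      simp [PySem.Str.startswith, ← hs]
      exact (PySem.Chars.startswith_iff _ _).mpr this
    have hfind : PySem.Str.find content "\ndiff --git"
        = PySem.Chars.find s ('\n' :: pvMarker) := by
      simp [PySem.Str.find, ← hs, hnlmk]
    rw [hfind, ← hjoin, pv_find_join t h hpieces hP]
    by_cases hD : (h :: t).dropWhile pvQ = []
    · rw [if_pos hD, if_pos rfl, hD]
      have hT : (h :: t).takeWhile pvQ = h :: t := by
        have := List.takeWhile_append_dropWhile (p := pvQ) (l := h :: t)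
        rwa [hD, List.append_nil] at this
      rw [hT]
      simp only [List.nil_append, PySem.Chars.join_nil, hjoin]
      rw [hs, String.ofList_toList]
    · rw [if_neg hD]
      set T := (h :: t).takeWhile pvQ with hT
      set D := (h :: t).dropWhile pvQ with hDdef
      set k := (PySem.Chars.join ['\n'] T).length with hk
      rw [if_neg (by omega)]
      have hTne : T ≠ [] := by
        rw [hT, List.takeWhile_cons_of_pos (by simp [pvQ, hP])]
        simp
      have hTD : T ++ D = h :: t := List.takeWhile_append_dropWhile
      have hsplit : PySem.Chars.join ['\n'] (h :: t)
          = PySem.Chars.join ['\n'] T ++ '\n' :: PySem.Chars.join ['\n'] D := by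
        rw [← hTD, pv_join_append '\n' T D hTne hD]
      have htake : List.take k (PySem.Chars.join ['\n'] (h :: t))
          = PySem.Chars.join ['\n'] T := by
        rw [hsplit, hk, List.take_left]
      have hdrop : List.drop (k + 1) (PySem.Chars.join ['\n'] (h :: t))
          = PySem.Chars.join ['\n'] D := by
        rw [hsplit, hk, List.drop_append, List.drop_eq_nil_of_le (by omega)]
        have : (PySem.Chars.join ['\n'] T).length + 1
            - (PySem.Chars.join ['\n'] T).length = 1 := by omega
        rw [this, List.drop_succ_cons, List.drop_zero, List.nil_append]
      have hsl1 : PySem.Str.slice content none (some (k : Int))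
          = String.ofList (PySem.Chars.join ['\n'] T) := by
        rw [PySem.Str.slice]
        congr 1
        rw [PySem.Chars.slice_eq_listSlice, PySem.List.slice_to _ (by omega), ← hs]
        rw [show ((k : Int)).toNat = k from by omega, ← hjoin, htake]
      have hsl2 : PySem.Str.slice content (some ((k : Int) + 1)) none
          = String.ofList (PySem.Chars.join ['\n'] D) := by
        rw [PySem.Str.slice]
        congr 1
        rw [PySem.Chars.slice_eq_listSlice, PySem.List.slice_from _ (by omega), ← hs]
        rw [show ((k : Int) + 1).toNat = k + 1 from by omega, ← hjoin, hdrop]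
      rw [hsl1, hsl2]
      simp

-- ===== VERDICT (by name: the statement is the Claim_ definition above) =====
theorem split_commit_parts_py_spec : Claim_equal_split_commit_parts_py := by
  intro content _
  unfold Spec_split_commit_parts_py
  exact pv_main content
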